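-- pv_equiv track=rewrite | github.com/cyr0930/impl | etc/distance_oracle.py | dfs_for_weights
-- ===== SOURCE A (Python) =====
-- def dfs_for_weights(g, node, g_weighted, seen):
--     seen.add(node)
--     count = 0
--     for nei in g[node]:
--         if nei in seen:
--             continue
--         val = dfs_for_weights(g, nei, g_weighted, seen)
--         g_weighted.setdefault(node, {})[nei] = val
--         count += val
--     return count + 1
-- ===== SOURCE B (Python) =====
-- def dfs_for_weights(g, node, g_weighted, seen):
--     # Iterative DFS: explicit stack of [node, neighbour-iterator, count] frames
--     # replaces the recursion; same traversal order, same mutations of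
--     # g_weighted and seen, same return value.
--     seen.add(node)
--     stack = [[node, iter(g[node]), 0]]
--     while True:
--         frame = stack[-1]
--         nei = next(frame[1], None)
--         if nei is None:
--             stack.pop()
--             val = frame[2] + 1
--             if not stack:
--                 return val
--             parent = stack[-1]
--             g_weighted.setdefault(parent[0], {})[frame[0]] = val
--             parent[2] += val
--         elif nei not in seen:
--             seen.add(nei)
--             stack.append([nei, iter(g[nei]), 0])
-- ===== Notes on version B (the rewrite author's own statement) =====
-- stated objective: alternative
-- what changed: The recursive DFS is replaced by an iterative explicit-stack DFS whose frames hold (node, neighbour-iterator, count); seen is marked at push time and g_weighted is filled at pop time, preserving the exact traversal order, mutations and return value without Python recursion (no recursion-depth limit).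
import Mathlib
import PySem

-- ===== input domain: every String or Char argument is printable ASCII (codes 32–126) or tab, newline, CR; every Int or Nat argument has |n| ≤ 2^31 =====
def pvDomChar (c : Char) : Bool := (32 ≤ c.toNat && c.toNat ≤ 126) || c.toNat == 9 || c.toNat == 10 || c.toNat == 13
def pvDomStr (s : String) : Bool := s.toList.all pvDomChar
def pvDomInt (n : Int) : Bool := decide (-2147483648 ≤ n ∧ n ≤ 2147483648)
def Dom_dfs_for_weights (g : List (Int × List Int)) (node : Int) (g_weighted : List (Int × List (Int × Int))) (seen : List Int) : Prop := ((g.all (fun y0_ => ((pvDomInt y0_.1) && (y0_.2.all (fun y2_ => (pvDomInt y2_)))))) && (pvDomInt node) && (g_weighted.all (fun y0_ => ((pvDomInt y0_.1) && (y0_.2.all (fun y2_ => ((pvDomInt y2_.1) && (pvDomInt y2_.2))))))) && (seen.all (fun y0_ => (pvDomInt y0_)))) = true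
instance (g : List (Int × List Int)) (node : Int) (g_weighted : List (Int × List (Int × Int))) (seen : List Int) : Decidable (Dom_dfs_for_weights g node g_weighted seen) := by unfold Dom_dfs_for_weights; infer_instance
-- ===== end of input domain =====

-- B replaces the recursive DFS by an explicit-stack iterative DFS (same traversal
-- order, same mutations); the equivalence proved here is about the RETURN value only
-- (both Pythons mutate g_weighted and seen identically, checked by testing).

-- ===== PORT A =====
-- `g_weighted.setdefault(node, {})[nei] = val` (same line in A and in B)
def gwSet (gw : List (Int × List (Int × Int))) (node nei v : Int) : List (Int × List (Int × Int)) :=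
  ((PySem.Dict.mk gw).insert node
    (((PySem.Dict.mk (((PySem.Dict.mk gw).get? node).getD [])).insert nei v).items)).items

mutual
-- `dfs_for_weights` body: seen.add(node); count = 0; loop over g[node]; return count+1.
-- fuel is a pure totality guard (none = fuel exhausted or KeyError on g[node]).
def dfsA (fuel : Nat) (g : List (Int × List Int)) (node : Int)
    (gw : List (Int × List (Int × Int))) (seen : PySem.Set Int) :
    Option (Int × List (Int × List (Int × Int)) × PySem.Set Int) :=
  match fuel with
  | 0 => none
  | f + 1 =>
    let seen1 := PySem.Set.add seen node
    match (PySem.Dict.mk g).get? node with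
    | none => none
    | some neis => loopA f g node neis 0 gw seen1
termination_by (fuel, 0)

-- the `for nei in g[node]` loop with accumulator `count`
def loopA (f : Nat) (g : List (Int × List Int)) (node : Int) (neis : List Int) (count : Int)
    (gw : List (Int × List (Int × Int))) (seen : PySem.Set Int) :
    Option (Int × List (Int × List (Int × Int)) × PySem.Set Int) :=
  match neis with
  | [] => some (count + 1, gw, seen)
  | nei :: rest =>
    if PySem.Set.contains seen nei then
      loopA f g node rest count gw seen
    else
      match dfsA f g nei gw seen with
      | none => none
      | some (v, gw', seen') => loopA f g node rest (count + v) (gwSet gw' node nei v) seen'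
termination_by (f, neis.length + 1)
end

def dfs_for_weights (g : List (Int × List Int)) (node : Int) (g_weighted : List (Int × List (Int × Int))) (seen : List Int) : Int :=
  match dfsA (g.length + 1) g node g_weighted seen with
  | some (v, _, _) => v
  | none => 0

-- ===== PORT B =====
-- number of graph entries whose key is not yet seen (termination measure of the machine)
def unseenCnt (g : List (Int × List Int)) (seen : PySem.Set Int) : Nat :=
  (g.filter (fun p => !(PySem.Set.contains seen p.1))).length

def stackWt (stack : List (Int × List Int × Int)) : Nat :=
  (stack.map (fun fr => fr.2.1.length)).sum + stack.length

theorem filt_le {α : Type} (l : List α) (f g : α → Bool) (h : ∀ a, g a = true → f a = true) :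
    (l.filter g).length ≤ (l.filter f).length :=
  List.Sublist.length_le (List.monotone_filter_right l h)

theorem filt_lt {α : Type} (l : List α) (f g : α → Bool) (h : ∀ a, g a = true → f a = true)
    (a : α) (ha : a ∈ l) (hf : f a = true) (hg : g a = false) :
    (l.filter g).length < (l.filter f).length := by
  induction l with
  | nil => simp at ha
  | cons b t ih =>
    rcases List.mem_cons.1 ha with rfl | hat
    · have := filt_le t f g h
      simp [hf, hg]
      omega
    · have hle := filt_le t f g h
      have hlt := ih hat
      by_cases hb : g b = true
      · simp [hb, h b hb]; omega
      · simp only [Bool.not_eq_true] at hb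
        by_cases hfb : f b = true <;> simp [hb, hfb] <;> omega

theorem unseenCnt_add_lt (g : List (Int × List Int)) (s : PySem.Set Int) (x : Int)
    (hk : x ∈ g.map Prod.fst) (hs : x ∉ s) :
    unseenCnt g (PySem.Set.add s x) < unseenCnt g s := by
  obtain ⟨p, hp, hpx⟩ : ∃ p ∈ g, p.1 = x := by
    simpa using hk
  refine filt_lt _ _ _ ?_ p hp ?_ ?_
  · intro a haC
    simp at haC ⊢
    exact haC.1
  · simp
    exact hpx ▸ hs
  · simp
    intro _
    exact hpx

theorem mem_keys_of_get?_eq_some {g : List (Int × List Int)} {k : Int} {v : List Int}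
    (h : (PySem.Dict.mk g).get? k = some v) : k ∈ g.map Prod.fst := by
  by_contra hk
  have hn : (PySem.Dict.mk g).get? k = none := by
    rw [PySem.Dict.get?_eq_none_iff_not_mem_keys]
    simpa [PySem.Dict.keys_mk] using hk
  rw [hn] at h
  simp at h

-- the while-loop of B: one step per iteration; frames are (node, remaining neighbours, count)
def runB (g : List (Int × List Int)) (stack : List (Int × List Int × Int))
    (gw : List (Int × List (Int × Int))) (seen : PySem.Set Int) :
    Option (Int × List (Int × List (Int × Int)) × PySem.Set Int) :=
  match stack with
  | [] => none
  | (nd, neis, cnt) :: rest =>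
    match neis with
    | [] =>
      -- iterator exhausted: pop, val = count + 1
      match rest with
      | [] => some (cnt + 1, gw, seen)
      | (pn, pneis, pc) :: rr =>
        runB g ((pn, pneis, pc + (cnt + 1)) :: rr) (gwSet gw pn nd (cnt + 1)) seen
    | nei :: more =>
      if hseen : PySem.Set.contains seen nei = true then
        runB g ((nd, more, cnt) :: rest) gw seen
      else
        match hg : (PySem.Dict.mk g).get? nei with
        | none => none
        | some nneis =>
          runB g ((nei, nneis, 0) :: (nd, more, cnt) :: rest) gw (PySem.Set.add seen nei)
termination_by (unseenCnt g seen, stackWt stack)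
decreasing_by
  · apply Prod.Lex.right
    simp [stackWt]
  · apply Prod.Lex.right
    simp [stackWt]
  · apply Prod.Lex.left
    apply unseenCnt_add_lt g seen nei (mem_keys_of_get?_eq_some hg)
    simpa [PySem.Set.contains_iff] using hseen

def dfs_for_weights_alt (g : List (Int × List Int)) (node : Int) (g_weighted : List (Int × List (Int × Int))) (seen : List Int) : Int :=
  let seen1 := PySem.Set.add seen node
  match (PySem.Dict.mk g).get? node with
  | none => 0
  | some neis =>
    match runB g [(node, neis, 0)] g_weighted seen1 with
    | some (v, _, _) => v
    | none => 0

-- ===== PRECONDITION & SPEC =====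
-- one expansion step of reachability from s, avoiding the initial seen set
def pvStep (g : List (Int × List Int)) (seen0 : PySem.Set Int) (s : PySem.Set Int) : PySem.Set Int :=
  PySem.Set.update s
    (s.flatMap (fun u => ((((PySem.Dict.mk g).get? u).getD []).filter
      (fun v => !(PySem.Set.contains seen0 v)))))

def pvIter (g : List (Int × List Int)) (seen0 : PySem.Set Int) : Nat → PySem.Set Int → PySem.Set Int
  | 0, s => s
  | k + 1, s => pvIter g seen0 k (pvStep g seen0 s)

-- the nodes reachable from node through neighbours not in seen (enough iterations to reach the fixpoint)
def pvReach (g : List (Int × List Int)) (node : Int) (seen0 : PySem.Set Int) : PySem.Set Int :=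
  pvIter g seen0 ((g.flatMap (fun p => p.2)).length + 1) [node]

-- Pre_ excludes exactly the inputs on which Python A raises KeyError: node itself, or some
-- node reachable from it through neighbours outside seen, is missing from g's keys.
def Pre_dfs_for_weights (g : List (Int × List Int)) (node : Int) (g_weighted : List (Int × List (Int × Int))) (seen : List Int) : Prop :=
  node ∈ g.map Prod.fst ∧ ∀ r ∈ pvReach g node seen, r ∈ g.map Prod.fst
instance (g : List (Int × List Int)) (node : Int) (g_weighted : List (Int × List (Int × Int))) (seen : List Int) : Decidable (Pre_dfs_for_weights g node g_weighted seen) := by unfold Pre_dfs_for_weights; infer_instance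

def pvWitness_dfs_for_weights : (List (Int × List Int)) × Int × (List (Int × List (Int × Int))) × List Int :=
  ([(0, [1, 2]), (1, [2]), (2, [0])], 0, [], [])

def Spec_dfs_for_weights (g : List (Int × List Int)) (node : Int) (g_weighted : List (Int × List (Int × Int))) (seen : List Int) (out : Int) : Prop := out = dfs_for_weights_alt g node g_weighted seen
instance (g : List (Int × List Int)) (node : Int) (g_weighted : List (Int × List (Int × Int))) (seen : List Int) (out : Int) : Decidable (Spec_dfs_for_weights g node g_weighted seen out) := by unfold Spec_dfs_for_weights; infer_instance

-- ===== CLAIM (what is proved, stated in full; the proofs are below) =====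
def Claim_equal_dfs_for_weights : Prop := ∀ (g : List (Int × List Int)) (node : Int) (g_weighted : List (Int × List (Int × Int))) (seen : List Int), Dom_dfs_for_weights g node g_weighted seen → Pre_dfs_for_weights g node g_weighted seen → Spec_dfs_for_weights g node g_weighted seen (dfs_for_weights g node g_weighted seen)

-- ===== LEMMAS AND PROOFS =====

theorem unseenCnt_mono (g : List (Int × List Int)) (s s' : PySem.Set Int)
    (h : ∀ x, x ∈ s → x ∈ s') : unseenCnt g s' ≤ unseenCnt g s := by
  apply filt_le
  intro p hp
  simp at hp ⊢
  exact fun hm => hp (h _ hm)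


-- The machine simulates the recursion: running it with a frame for (node, neis, count)
-- on top behaves like finishing loopA for that frame and then continuing with the parent.
theorem sim (g : List (Int × List Int)) :
    ∀ (f : Nat) (neis : List Int) (node : Int) (count : Int) gw seen rest val gw1 seen1,
    loopA f g node neis count gw seen = some (val, gw1, seen1) →
    runB g ((node, neis, count) :: rest) gw seen =
      (match rest with
       | [] => some (val, gw1, seen1)
       | (pn, pneis, pc) :: rr =>
         runB g ((pn, pneis, pc + val) :: rr) (gwSet gw1 pn node val) seen1) := by
  intro f
  induction f with
  | zero =>
    intro neis
    induction neis with
    | nil =>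
      intro node count gw seen rest val gw1 seen1 h
      rw [loopA] at h
      simp only [Option.some.injEq, Prod.mk.injEq] at h
      obtain ⟨h1, h2, h3⟩ := h
      subst h1; subst h2; subst h3
      rcases rest with _ | ⟨⟨pn, pneis, pc⟩, rr⟩ <;> rw [runB]
    | cons nei more ih =>
      intro node count gw seen rest val gw1 seen1 h
      rw [loopA] at h
      by_cases hs : PySem.Set.contains seen nei = true
      · simp only [hs, if_true] at h
        rw [runB]
        simp only [hs, dif_pos]
        exact ih node count gw seen rest val gw1 seen1 h
      · have hs' : PySem.Set.contains seen nei = false := by simpa using hs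
        simp only [hs', Bool.false_eq_true, if_false] at h
        rw [dfsA] at h
        simp at h
  | succ f' ihf =>
    intro neis
    induction neis with
    | nil =>
      intro node count gw seen rest val gw1 seen1 h
      rw [loopA] at h
      simp only [Option.some.injEq, Prod.mk.injEq] at h
      obtain ⟨h1, h2, h3⟩ := h
      subst h1; subst h2; subst h3
      rcases rest with _ | ⟨⟨pn, pneis, pc⟩, rr⟩ <;> rw [runB]
    | cons nei more ih =>
      intro node count gw seen rest val gw1 seen1 h
      rw [loopA] at h
      by_cases hs : PySem.Set.contains seen nei = true
      · simp only [hs, if_true] at h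
        rw [runB]
        simp only [hs, dif_pos]
        exact ih node count gw seen rest val gw1 seen1 h
      · have hs' : PySem.Set.contains seen nei = false := by simpa using hs
        simp only [hs', Bool.false_eq_true, if_false] at h
        rcases hd : dfsA (f' + 1) g nei gw seen with _ | ⟨v, gw', seen'⟩ <;> rw [hd] at h
        · simp at h
        · simp only [] at h
          rw [dfsA] at hd
          rcases hg : (PySem.Dict.mk g).get? nei with _ | nneis <;> simp only [hg] at hd
          · simp at hd
          · -- hd : loopA f' g nei nneis 0 gw (add seen nei) = some (v, gw', seen')
            rw [runB]
            simp only [hs', Bool.false_eq_true, dite_false]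
            split
            · next heq =>
              rw [hg] at heq
              simp at heq
            · next nn heq =>
              rw [hg] at heq
              injection heq with h2
              subst h2
              have step := ihf nneis nei 0 gw (PySem.Set.add seen nei)
                ((node, more, count) :: rest) v gw' seen' hd
              rw [step]
              exact ih node (count + v) (gwSet gw' node nei v) seen' rest val gw1 seen1 h

-- membership in Set.update
theorem mem_update_iff (s : PySem.Set Int) (xs : List Int) (y : Int) :
    y ∈ PySem.Set.update s xs ↔ y ∈ s ∨ y ∈ xs := by
  rw [PySem.Set.update_eq_append_filter]
  simp only [List.mem_append, List.mem_filter, PySem.Set.mem_ofList]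
  constructor
  · rintro (h | ⟨h, _⟩)
    · exact Or.inl h
    · exact Or.inr h
  · rintro (h | h)
    · exact Or.inl h
    · by_cases hy : y ∈ s
      · exact Or.inl hy
      · refine Or.inr ⟨h, ?_⟩
        simp [PySem.Set.contains_iff, hy]

theorem step_subset (g : List (Int × List Int)) (seen0 s : PySem.Set Int) :
    ∀ x ∈ s, x ∈ pvStep g seen0 s := by
  intro x hx
  exact (mem_update_iff _ _ _).2 (Or.inl hx)

theorem subset_iter (g : List (Int × List Int)) (seen0 : PySem.Set Int) :
    ∀ (k : Nat) (s : PySem.Set Int), ∀ x ∈ s, x ∈ pvIter g seen0 k s := by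
  intro k
  induction k with
  | zero => intro s x hx; rw [pvIter]; exact hx
  | succ k ih =>
    intro s x hx
    rw [pvIter]
    exact ih (pvStep g seen0 s) x (step_subset g seen0 s x hx)

theorem step_pool (g : List (Int × List Int)) (seen0 s : PySem.Set Int) (pool : List Int)
    (hflat : ∀ v ∈ g.flatMap (fun p => p.2), v ∈ pool)
    (hs : ∀ x ∈ s, x ∈ pool) : ∀ x ∈ pvStep g seen0 s, x ∈ pool := by
  intro x hx
  rcases (mem_update_iff _ _ _).1 hx with h | h
  · exact hs x h
  · obtain ⟨u, hu, hxf⟩ := List.mem_flatMap.1 h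
    obtain ⟨hxm, _⟩ := List.mem_filter.1 hxf
    rcases hg : (PySem.Dict.mk g).get? u with _ | neis
    · rw [hg] at hxm; simp at hxm
    · rw [hg] at hxm
      apply hflat
      apply List.mem_flatMap.2
      exact ⟨(u, neis), PySem.Dict.mem_items_of_get?_eq_some _ hg, hxm⟩

theorem iter_pool (g : List (Int × List Int)) (seen0 : PySem.Set Int) (pool : List Int)
    (hflat : ∀ v ∈ g.flatMap (fun p => p.2), v ∈ pool) :
    ∀ (k : Nat) (s : PySem.Set Int), (∀ x ∈ s, x ∈ pool) →
      ∀ x ∈ pvIter g seen0 k s, x ∈ pool := by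
  intro k
  induction k with
  | zero => intro s hs x hx; rw [pvIter] at hx; exact hs x hx
  | succ k ih =>
    intro s hs x hx
    rw [pvIter] at hx
    exact ih (pvStep g seen0 s) (step_pool g seen0 s pool hflat hs) x hx

theorem nodup_step (g : List (Int × List Int)) (seen0 s : PySem.Set Int) (h : s.Nodup) :
    (pvStep g seen0 s).Nodup :=
  PySem.Set.nodup_update _ _ h

theorem nodup_iter (g : List (Int × List Int)) (seen0 : PySem.Set Int) :
    ∀ (k : Nat) (s : PySem.Set Int), s.Nodup → (pvIter g seen0 k s).Nodup := by
  intro k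
  induction k with
  | zero => intro s hs; rw [pvIter]; exact hs
  | succ k ih =>
    intro s hs
    rw [pvIter]
    exact ih _ (nodup_step g seen0 s hs)

theorem nodup_len_le (s pool : List Int) (h : s.Nodup) (hsub : ∀ x ∈ s, x ∈ pool) :
    s.length ≤ pool.length := by
  calc s.length = s.toFinset.card := (List.toFinset_card_of_nodup h).symm
    _ ≤ pool.toFinset.card := Finset.card_le_card (by
        intro x hx
        exact List.mem_toFinset.2 (hsub x (List.mem_toFinset.1 hx)))
    _ ≤ pool.length := List.toFinset_card_le pool

theorem update_grow (s xs : List Int) (h : PySem.Set.update s xs ≠ s) :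
    s.length < (PySem.Set.update s xs).length := by
  rw [PySem.Set.update_eq_append_filter] at h ⊢
  rcases hx : (PySem.Set.ofList xs).filter (fun y => !(PySem.Set.contains s y)) with _ | ⟨a, t⟩
  · rw [hx, List.append_nil] at h
    exact absurd rfl h
  · simp

theorem step_grow (g : List (Int × List Int)) (seen0 s : PySem.Set Int)
    (h : pvStep g seen0 s ≠ s) : s.length < (pvStep g seen0 s).length := by
  unfold pvStep at h ⊢
  exact update_grow _ _ h

theorem iter_of_fix (g : List (Int × List Int)) (seen0 : PySem.Set Int) :
    ∀ (k : Nat) (s : PySem.Set Int), pvStep g seen0 s = s → pvIter g seen0 k s = s := by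
  intro k
  induction k with
  | zero => intro s _; rw [pvIter]
  | succ k ih =>
    intro s hs
    rw [pvIter, hs]
    exact ih s hs

theorem stab (g : List (Int × List Int)) (seen0 : PySem.Set Int) :
    ∀ (k : Nat) (s : PySem.Set Int),
      pvStep g seen0 (pvIter g seen0 k s) = pvIter g seen0 k s ∨
      s.length + k ≤ (pvIter g seen0 k s).length := by
  intro k
  induction k with
  | zero => intro s; right; rw [pvIter]; omega
  | succ k ih =>
    intro s
    by_cases hfx : pvStep g seen0 s = s
    · left
      rw [pvIter, hfx, iter_of_fix g seen0 k s hfx]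
      exact hfx
    · rcases ih (pvStep g seen0 s) with h | h
      · left; rw [pvIter]; exact h
      · right
        rw [pvIter]
        have := step_grow g seen0 s hfx
        omega

theorem reach_fix (g : List (Int × List Int)) (node : Int) (seen0 : PySem.Set Int) :
    pvStep g seen0 (pvReach g node seen0) = pvReach g node seen0 := by
  rcases stab g seen0 ((g.flatMap (fun p => p.2)).length + 1) [node] with h | h
  · exact h
  · exfalso
    have hpool : ∀ x ∈ pvIter g seen0 ((g.flatMap (fun p => p.2)).length + 1) [node],
        x ∈ node :: g.flatMap (fun p => p.2) := by
      apply iter_pool g seen0 _ (fun v hv => List.mem_cons_of_mem _ hv)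
      intro x hx
      simp only [List.mem_singleton] at hx
      exact hx ▸ List.mem_cons_self
    have hnd : (pvIter g seen0 ((g.flatMap (fun p => p.2)).length + 1) [node]).Nodup :=
      nodup_iter g seen0 _ _ (List.nodup_singleton node)
    have hlen := nodup_len_le _ _ hnd hpool
    simp only [List.length_singleton, List.length_cons] at h hlen
    omega

-- fuel sufficiency: with R a pvStep-closed set of keys containing every node the DFS can
-- look up, and fuel exceeding the number of unseen graph entries, dfsA returns some, and
-- seen only grows.
theorem QL (g : List (Int × List Int)) (f : Nat) (seen0 R : PySem.Set Int)
    (hQD : ∀ node gw seen, node ∈ R → (∀ x ∈ seen0, x ∈ seen) →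
      unseenCnt g (PySem.Set.add seen node) + 1 ≤ f →
      ∃ v gw' seen', dfsA f g node gw seen = some (v, gw', seen') ∧
        ∀ x, x ∈ PySem.Set.add seen node → x ∈ seen') :
    ∀ (neis : List Int) node count gw seen,
      (∀ n ∈ neis, n ∉ seen0 → n ∈ R) → (∀ x ∈ seen0, x ∈ seen) →
      (∀ n ∈ R, n ∈ g.map Prod.fst) → unseenCnt g seen ≤ f →
      ∃ v gw' seen', loopA f g node neis count gw seen = some (v, gw', seen') ∧
        ∀ x, x ∈ seen → x ∈ seen' := by
  intro neis node
  induction neis with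
  | nil =>
    intro count gw seen _ _ _ _
    exact ⟨count + 1, gw, seen, by rw [loopA], fun x hx => hx⟩
  | cons nei rest ih =>
    intro count gw seen hnb hs0 hkeys hf
    by_cases hs : PySem.Set.contains seen nei = true
    · obtain ⟨v, gw', seen', hlp, hsub⟩ :=
        ih count gw seen (fun n hn => hnb n (List.mem_cons_of_mem _ hn)) hs0 hkeys hf
      refine ⟨v, gw', seen', ?_, hsub⟩
      rw [loopA]
      simp only [hs, if_true]
      exact hlp
    · have hs' : PySem.Set.contains seen nei = false := by simpa using hs
      have hns : nei ∉ seen := by simpa using hs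
      have hns0 : nei ∉ seen0 := fun h0 => hns (hs0 nei h0)
      have hR : nei ∈ R := hnb nei List.mem_cons_self hns0
      have hkn : nei ∈ g.map Prod.fst := hkeys nei hR
      have hlt := unseenCnt_add_lt g seen nei hkn hns
      obtain ⟨v, gw', seen', hd, hsub1⟩ := hQD nei gw seen hR hs0 (by omega)
      have hsub0 : ∀ x, x ∈ seen → x ∈ seen' :=
        fun x hx => hsub1 x ((PySem.Set.mem_add seen nei x).2 (Or.inl hx))
      have hUle : unseenCnt g seen' ≤ f :=
        le_trans (unseenCnt_mono g seen seen' hsub0) hf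
      obtain ⟨v2, gw2, seen2, hlp, hsub2⟩ :=
        ih (count + v) (gwSet gw' node nei v) seen'
          (fun n hn => hnb n (List.mem_cons_of_mem _ hn))
          (fun x hx => hsub0 x (hs0 x hx)) hkeys hUle
      refine ⟨v2, gw2, seen2, ?_, fun x hx => hsub2 x (hsub0 x hx)⟩
      rw [loopA]
      simp only [hs', Bool.false_eq_true, if_false, hd]
      exact hlp

theorem QD (g : List (Int × List Int)) (seen0 R : PySem.Set Int)
    (hfix : pvStep g seen0 R = R)
    (hkeys : ∀ r ∈ R, r ∈ g.map Prod.fst) :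
    ∀ (f : Nat) node gw seen, node ∈ R → (∀ x ∈ seen0, x ∈ seen) →
      unseenCnt g (PySem.Set.add seen node) + 1 ≤ f →
      ∃ v gw' seen', dfsA f g node gw seen = some (v, gw', seen') ∧
        ∀ x, x ∈ PySem.Set.add seen node → x ∈ seen' := by
  intro f
  induction f with
  | zero =>
    intro node gw seen _ _ hf
    exact absurd hf (by omega)
  | succ f' ih =>
    intro node gw seen hR hs0 hf
    have hkn : node ∈ g.map Prod.fst := hkeys node hR
    obtain ⟨neis, hg⟩ : ∃ neis, (PySem.Dict.mk g).get? node = some neis := by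
      rcases hG : (PySem.Dict.mk g).get? node with _ | neis
      · rw [PySem.Dict.get?_eq_none_iff_not_mem_keys] at hG
        exact absurd (by simpa [PySem.Dict.keys_mk] using hkn) hG
      · exact ⟨neis, rfl⟩
    have hneis : ∀ n ∈ neis, n ∉ seen0 → n ∈ R := by
      intro n hn hn0
      rw [← hfix]
      apply (mem_update_iff _ _ _).2
      refine Or.inr (List.mem_flatMap.2 ⟨node, hR, ?_⟩)
      rw [hg]
      apply List.mem_filter.2
      refine ⟨hn, ?_⟩
      simp [PySem.Set.contains_iff, hn0]
    obtain ⟨v, gw', seen', hlp, hsub⟩ :=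
      QL g f' seen0 R ih neis node 0 gw (PySem.Set.add seen node) hneis
        (fun x hx => (PySem.Set.mem_add seen node x).2 (Or.inl (hs0 x hx))) hkeys (by omega)
    refine ⟨v, gw', seen', ?_, hsub⟩
    rw [dfsA, hg]
    exact hlp

-- ===== VERDICT (by name: the statement is the Claim_ definition above) =====
theorem dfs_for_weights_spec : Claim_equal_dfs_for_weights := by
  intro g node gw seen _ hpre
  obtain ⟨hmem, hkeys⟩ := hpre
  unfold Spec_dfs_for_weights
  obtain ⟨neis, hg⟩ : ∃ neis, (PySem.Dict.mk g).get? node = some neis := by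
    rcases hG : (PySem.Dict.mk g).get? node with _ | neis
    · rw [PySem.Dict.get?_eq_none_iff_not_mem_keys] at hG
      exact absurd (by simpa [PySem.Dict.keys_mk] using hmem) hG
    · exact ⟨neis, rfl⟩
  have hU : unseenCnt g (PySem.Set.add seen node) + 1 ≤ g.length + 1 := by
    have hle : unseenCnt g (PySem.Set.add seen node) ≤ g.length :=
      List.length_filter_le _ _
    omega
  have hnodeR : node ∈ pvReach g node seen :=
    subset_iter g seen _ [node] node List.mem_cons_self
  obtain ⟨val, gw1, seen1, hd, _⟩ :=
    QD g seen (pvReach g node seen) (reach_fix g node seen) hkeys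
      (g.length + 1) node gw seen hnodeR (fun x hx => hx) hU
  have hd' : loopA g.length g node neis 0 gw (PySem.Set.add seen node)
      = some (val, gw1, seen1) := by
    rw [dfsA, hg] at hd
    exact hd
  have hrun := sim g g.length neis node 0 gw (PySem.Set.add seen node) [] val gw1 seen1 hd'
  simp only [dfs_for_weights, dfs_for_weights_alt, hd, hg]
  rw [hrun]
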